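-- pv_equiv track=rewrite | github.com/akimov246/leetcode | 2027. Minimum Moves to Convert String.py | minimumMoves
-- ===== SOURCE A (Python) =====
-- def minimumMoves(s: str) -> int:
--     moves = 0
--     index = 3
--     step = 3
--     while index < len(s) + step:
--         if s[index - step:index].startswith('X'):
--             index += step
--             moves += 1
--         elif 'X' in s[index - step:index]:
--             index += 1
--         else:
--             index += step
--     return moves
-- ===== SOURCE B (Python) =====
-- def minimumMoves(s: str) -> int:
--     moves = 0
--     last_covered = -1
--     for p, c in enumerate(s):
--         if c == 'X' and p > last_covered:
--             moves += 1
--             last_covered = p + 2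
--     return moves
-- ===== Notes on version B (the rewrite author's own statement) =====
-- stated objective: simpler
-- what changed: Replaced A's while-loop that repeatedly slices 3-char windows and re-scans each window for the target character with a single indexed pass that counts a target character only when its position is past the last covered position (last_covered = p+2); no slicing or window re-scanning.
import Mathlib
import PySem

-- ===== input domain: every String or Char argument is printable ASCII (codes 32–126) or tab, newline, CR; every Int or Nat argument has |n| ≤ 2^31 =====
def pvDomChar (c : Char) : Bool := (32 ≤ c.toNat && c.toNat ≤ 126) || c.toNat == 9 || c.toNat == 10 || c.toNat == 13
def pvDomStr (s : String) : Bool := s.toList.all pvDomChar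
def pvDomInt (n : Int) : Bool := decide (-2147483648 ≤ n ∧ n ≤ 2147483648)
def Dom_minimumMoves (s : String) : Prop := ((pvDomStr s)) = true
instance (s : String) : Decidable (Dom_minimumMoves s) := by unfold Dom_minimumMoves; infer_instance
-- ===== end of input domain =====

-- B replaces A's sliding 3-char-window while-loop by a single indexed pass that
-- counts each uncovered 'X' and records the last covered position (objective: simpler).

-- ===== PORT A =====
-- A's while-loop: index advances by 3 (window starts with 'X': count a move),
-- by 1 ('X' elsewhere in the window), or by 3 (no 'X' in the window).
def minimumMovesLoop (cs : List Char) (index : Int) (moves : Int) : Int :=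
  if _h : index < (cs.length : Int) + 3 then
    let w := PySem.List.slice cs (some (index - 3)) (some index)
    if PySem.Chars.startswith w ['X'] then
      minimumMovesLoop cs (index + 3) (moves + 1)
    else if PySem.Chars.isIn ['X'] w then
      minimumMovesLoop cs (index + 1) moves
    else
      minimumMovesLoop cs (index + 3) moves
  else moves
termination_by ((cs.length : Int) + 3 - index).toNat
decreasing_by all_goals omega

def minimumMoves (s : String) : Int :=
  minimumMovesLoop s.toList 3 0

-- ===== PORT B =====
-- B's single pass: fold over enumerate(s) with state (moves, last_covered).
def minimumMoves_alt (s : String) : Int :=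
  (PySem.List.enumerate s.toList 0).foldl
    (fun st pc =>
      if pc.2 = 'X' ∧ pc.1 > st.2 then (st.1 + 1, pc.1 + 2) else st)
    ((0 : Int), (-1 : Int)) |>.1

-- ===== PRECONDITION & SPEC =====
def Spec_minimumMoves (s : String) (out : Int) : Prop := out = minimumMoves_alt s
instance (s : String) (out : Int) : Decidable (Spec_minimumMoves s out) := by unfold Spec_minimumMoves; infer_instance

-- ===== CLAIM (what is proved, stated in full; the proofs are below) =====
def Claim_equal_minimumMoves : Prop := ∀ (s : String), Dom_minimumMoves s → Spec_minimumMoves s (minimumMoves s)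

-- ===== LEMMAS AND PROOFS =====

-- the common greedy specification: an 'X' costs one move and covers the next two chars
def pvGreedy : List Char → Int
  | [] => 0
  | c :: rest => if c = 'X' then 1 + pvGreedy (rest.drop 2) else pvGreedy rest
termination_by l => l.length
decreasing_by all_goals (simp [List.length_drop]; try omega)

lemma pvGreedy_nil : pvGreedy [] = 0 := by rw [pvGreedy]

lemma pvGreedy_cons (c : Char) (rest : List Char) :
    pvGreedy (c :: rest) = if c = 'X' then 1 + pvGreedy (rest.drop 2) else pvGreedy rest := by
  rw [pvGreedy]

lemma pvGreedy_no_X_take3 (l : List Char) (h : ¬ ('X' ∈ l.take 3)) :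
    pvGreedy (l.drop 3) = pvGreedy l := by
  match l with
  | [] => rfl
  | a :: [] =>
    simp [eq_comm] at h; simp [pvGreedy_nil, pvGreedy_cons, h]
  | a :: b :: [] =>
    simp [eq_comm] at h; simp [pvGreedy_nil, pvGreedy_cons, h.1, h.2]
  | a :: b :: c :: rest =>
    simp [eq_comm] at h
    simp [pvGreedy_cons, h.1, h.2.1, h.2.2]

lemma pvA_loop_eq (n : Nat) (cs : List Char) (index moves : Int) (h3 : 3 ≤ index)
    (hn : ((cs.length : Int) + 3 - index).toNat ≤ n) :
    minimumMovesLoop cs index moves = moves + pvGreedy (cs.drop (index - 3).toNat) := by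
  induction n generalizing index moves with
  | zero =>
    rw [minimumMovesLoop, dif_neg (by omega), List.drop_eq_nil_of_le (by omega), pvGreedy_nil]
    ring
  | succ n ih =>
    rw [minimumMovesLoop]
    by_cases hlt : index < (cs.length : Int) + 3
    · rw [dif_pos hlt]
      have hw : PySem.List.slice cs (some (index - 3)) (some index)
          = (cs.drop (index - 3).toNat).take 3 := by
        rw [PySem.List.slice_toNat cs (by omega) (by omega)]
        congr 1
        omega
      simp only [hw]
      rcases hL : cs.drop (index - 3).toNat with _ | ⟨c, rest⟩
      · -- window empty: branch 3, the remaining suffix stays empty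
        rw [if_neg (by simp [PySem.Chars.startswith_iff]),
            if_neg (by simp [PySem.Chars.isIn_iff_infix])]
        rw [ih (index + 3) moves (by omega) (by omega)]
        have hlen : cs.length ≤ (index - 3).toNat := List.drop_eq_nil_iff.mp hL
        rw [List.drop_eq_nil_of_le (by omega), pvGreedy_nil]
      · have hdrop3 : cs.drop (index + 3 - 3).toNat = (c :: rest).drop 3 := by
          rw [← hL, List.drop_drop]
          congr 1
          omega
        by_cases hc : c = 'X'
        · -- branch 1: window starts with 'X'
          rw [if_pos (by simp [PySem.Chars.startswith_iff, hc])]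
          rw [ih (index + 3) (moves + 1) (by omega) (by omega), hdrop3,
              pvGreedy_cons, if_pos hc]
          simp
          ring
        · have hsw : ¬ PySem.Chars.startswith (List.take 3 (c :: rest)) ['X'] = true := by
            simp [PySem.Chars.startswith_iff]
            exact fun h => hc h.symm
          by_cases hmem : 'X' ∈ (c :: rest).take 3
          · -- branch 2: 'X' elsewhere in the window
            rw [if_neg hsw,
                if_pos (by rw [PySem.Chars.isIn_iff_infix, List.singleton_infix_iff];
                           exact hmem)]
            rw [ih (index + 1) moves (by omega) (by omega)]
            have hdrop1 : cs.drop (index + 1 - 3).toNat = rest := by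
              have h1 : cs.drop (index + 1 - 3).toNat = (c :: rest).drop 1 := by
                rw [← hL, List.drop_drop]; congr 1; omega
              simpa using h1
            rw [hdrop1, pvGreedy_cons, if_neg hc]
          · -- branch 3: no 'X' in the window
            rw [if_neg hsw,
                if_neg (by rw [PySem.Chars.isIn_iff_infix, List.singleton_infix_iff];
                           exact hmem)]
            rw [ih (index + 3) moves (by omega) (by omega), hdrop3,
                pvGreedy_no_X_take3 _ hmem]
    · rw [dif_neg hlt, List.drop_eq_nil_of_le (by omega), pvGreedy_nil]
      ring

lemma pvB_fold_eq (l : List Char) (p last moves : Int) (hp : 0 ≤ p) :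
    ((PySem.List.enumerate l p).foldl
      (fun st pc =>
        if pc.2 = 'X' ∧ pc.1 > st.2 then (st.1 + 1, pc.1 + 2) else st)
      (moves, last)).1
    = moves + pvGreedy (l.drop (last + 1 - p).toNat) := by
  induction l generalizing p last moves with
  | nil => simp [PySem.List.enumerate, pvGreedy_nil]
  | cons c rest ih =>
    rw [PySem.List.enumerate_cons, List.foldl_cons]
    by_cases hcond : c = 'X' ∧ p > last
    · rw [if_pos hcond]
      rw [ih (p + 1) (p + 2) (moves + 1) (by omega)]
      have h0 : (last + 1 - p).toNat = 0 := by omega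
      have h2 : (p + 2 + 1 - (p + 1)).toNat = 2 := by omega
      rw [h0, h2, List.drop_zero, pvGreedy_cons, if_pos hcond.1]
      ring
    · rw [if_neg hcond]
      rw [ih (p + 1) last moves (by omega)]
      by_cases hpl : p ≤ last
      · have h1 : (last + 1 - p).toNat = (last + 1 - (p + 1)).toNat + 1 := by omega
        rw [h1]
        simp [List.drop_succ_cons]
      · have hc : ¬ c = 'X' := fun h => hcond ⟨h, by omega⟩
        have h0 : (last + 1 - p).toNat = 0 := by omega
        have h0' : (last + 1 - (p + 1)).toNat = 0 := by omega
        rw [h0, h0', List.drop_zero, List.drop_zero, pvGreedy_cons, if_neg hc]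

-- ===== VERDICT (by name: the statement is the Claim_ definition above) =====
theorem minimumMoves_spec : Claim_equal_minimumMoves := by
  intro s _
  unfold Spec_minimumMoves minimumMoves minimumMoves_alt
  rw [pvA_loop_eq (((s.toList.length : Int) + 3 - 3).toNat) s.toList 3 0 (by omega) (by omega),
      pvB_fold_eq s.toList 0 (-1) 0 (by omega)]
  norm_num
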